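-- pv_equiv track=rewrite | github.com/lsipii/newsfeed | app/main.py | _partition_blocks_line_targets
-- ===== SOURCE A (Python) =====
-- import bisect
-- from typing import Any, Dict, Generator, List, NamedTuple, Optional, Tuple
--
-- def _partition_blocks_line_targets(blocks: List[List[str]], n_cols: int) -> List[List[str]]:
--     """Split ``blocks`` into ``n_cols`` line streams at block boundaries (approx. equal lines)."""
--     if n_cols <= 1:
--         flat: List[str] = []
--         for b in blocks:
--             flat.extend(b)
--         return [flat]
--     m = len(blocks)
--     if m == 0:
--         return [[] for _ in range(n_cols)]
--     cum = [0]
--     for b in blocks: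
--         cum.append(cum[-1] + len(b))
--     total = cum[-1]
--     if total == 0:
--         return [[] for _ in range(n_cols)]
--     splits: List[int] = [0]
--     for k in range(1, n_cols):
--         target_line = (k * total) // n_cols
--         bi = bisect.bisect_left(cum, target_line)
--         bi = max(bi, splits[-1] + 1)
--         bi = min(bi, m)
--         splits.append(bi)
--     splits.append(m)
--     for i in range(1, len(splits)):
--         if splits[i] < splits[i - 1]:
--             splits[i] = splits[i - 1]
--     out: List[List[str]] = []
--     for j in range(n_cols):
--         s, e = splits[j], splits[j + 1]
--         col: List[str] = []
--         for bi in range(s, e):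
--             col.extend(blocks[bi])
--         out.append(col)
--     return out
-- ===== SOURCE B (Python) =====
-- def _partition_blocks_line_targets(blocks, n_cols):
--     """Split ``blocks`` into ``n_cols`` line streams at block boundaries (approx. equal lines)."""
--     if n_cols <= 1:
--         flat = []
--         for b in blocks:
--             flat.extend(b)
--         return [flat]
--     if len(blocks) == 0:
--         return [[] for _ in range(n_cols)]
--     total = 0
--     for b in blocks:
--         total += len(b)
--     if total == 0:
--         return [[] for _ in range(n_cols)]
--     # single pass: close the current column as soon as the running line count
--     # reaches the next target (k*total)//n_cols; at most one close per block,
--     # so every non-final column closed before the blocks run out is non-empty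
--     out = []
--     col = []
--     c = 0
--     t = 0  # number of columns already closed
--     for b in blocks:
--         col.extend(b)
--         c += len(b)
--         if t < n_cols - 1 and ((t + 1) * total) // n_cols <= c:
--             out.append(col)
--             col = []
--             t += 1
--     out.append(col)
--     out.extend([] for _ in range(n_cols - len(out)))
--     return out
-- ===== Notes on version B (the rewrite author's own statement) =====
-- stated objective: alternative
-- what changed: B replaces A's per-column bisect over a precomputed cumulative-sum array plus split-clamping and monotone-fix passes by a single streaming pass over the blocks that closes the current column as soon as the running line count reaches the next (k*total)//n_cols target, closing at most one column per block.
import Mathlib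
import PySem

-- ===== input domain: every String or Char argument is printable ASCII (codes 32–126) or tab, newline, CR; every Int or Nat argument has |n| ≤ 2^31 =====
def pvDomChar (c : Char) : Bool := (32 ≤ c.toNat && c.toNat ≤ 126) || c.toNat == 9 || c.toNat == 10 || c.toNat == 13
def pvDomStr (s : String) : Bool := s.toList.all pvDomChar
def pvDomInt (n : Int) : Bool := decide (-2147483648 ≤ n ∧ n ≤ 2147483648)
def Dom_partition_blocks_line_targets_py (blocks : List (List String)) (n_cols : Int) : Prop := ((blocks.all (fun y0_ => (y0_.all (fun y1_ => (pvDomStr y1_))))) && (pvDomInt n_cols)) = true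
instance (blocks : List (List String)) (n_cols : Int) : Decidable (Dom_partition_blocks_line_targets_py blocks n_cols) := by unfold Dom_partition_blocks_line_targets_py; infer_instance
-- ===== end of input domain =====

-- B replaces the bisect-over-cumulative-array split computation by a single streaming pass
-- that closes a column whenever the running line count reaches the next target; alternative
-- decomposition, same observable behaviour.

-- ===== PORT A =====
-- port of the in-place monotone-fix loop `for i in range(1, len(splits)): ...`
def pvFixAux (prev : Int) : List Int → List Int
  | [] => []
  | x :: xs => let y := if x < prev then prev else x
               y :: pvFixAux y xs

def pvFixLoop : List Int → List Int
  | [] => []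
  | x :: xs => x :: pvFixAux x xs

def partition_blocks_line_targets_py (blocks : List (List String)) (n_cols : Int) : List (List String) :=
  if n_cols ≤ 1 then
    [blocks.foldl (fun flat b => flat ++ b) []]
  else
    let m : Int := blocks.length
    if m = 0 then (PySem.List.pyRange 0 n_cols 1).map (fun _ => ([] : List String))
    else
      let cum : List Int := blocks.foldl (fun cum b => cum ++ [PySem.List.pyGetD cum (-1) 0 + (b.length : Int)]) [0]
      let total : Int := PySem.List.pyGetD cum (-1) 0
      if total = 0 then (PySem.List.pyRange 0 n_cols 1).map (fun _ => ([] : List String))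
      else
        let splits : List Int := (PySem.List.pyRange 1 n_cols 1).foldl (fun splits k =>
          let target_line := PySem.Int.floordiv (k * total) n_cols
          let bi : Int := (PySem.List.bisectLeft cum target_line : ℕ)
          let bi := max bi (PySem.List.pyGetD splits (-1) 0 + 1)
          let bi := min bi m
          splits ++ [bi]) [0]
        let splits := splits ++ [m]
        let splits := pvFixLoop splits
        (PySem.List.pyRange 0 n_cols 1).foldl (fun out j =>
          let s := PySem.List.pyGetD splits j 0
          let e := PySem.List.pyGetD splits (j + 1) 0
          let col := (PySem.List.pyRange s e 1).foldl (fun col bi =>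
            col ++ PySem.List.pyGetD blocks bi []) []
          out ++ [col]) []

-- ===== PORT B =====
def partition_blocks_line_targets_py_alt (blocks : List (List String)) (n_cols : Int) : List (List String) :=
  if n_cols ≤ 1 then
    [blocks.foldl (fun flat b => flat ++ b) []]
  else if (blocks.length : Int) = 0 then
    (PySem.List.pyRange 0 n_cols 1).map (fun _ => ([] : List String))
  else
    let total : Int := blocks.foldl (fun acc b => acc + (b.length : Int)) 0
    if total = 0 then (PySem.List.pyRange 0 n_cols 1).map (fun _ => ([] : List String))
    else
      let st := blocks.foldl (fun (st : List (List String) × List String × Int × Int) b =>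
        let col := st.2.1 ++ b
        let c := st.2.2.1 + (b.length : Int)
        if st.2.2.2 < n_cols - 1 ∧ PySem.Int.floordiv ((st.2.2.2 + 1) * total) n_cols ≤ c then
          (st.1 ++ [col], ([] : List String), c, st.2.2.2 + 1)
        else
          (st.1, col, c, st.2.2.2)) ([], [], 0, 0)
      (st.1 ++ [st.2.1]) ++ (PySem.List.pyRange 0 (n_cols - ((st.1.length : Int) + 1)) 1).map (fun _ => ([] : List String))

-- ===== PRECONDITION & SPEC =====
def Spec_partition_blocks_line_targets_py (blocks : List (List String)) (n_cols : Int) (out : List (List String)) : Prop := out = partition_blocks_line_targets_py_alt blocks n_cols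
instance (blocks : List (List String)) (n_cols : Int) (out : List (List String)) : Decidable (Spec_partition_blocks_line_targets_py blocks n_cols out) := by unfold Spec_partition_blocks_line_targets_py; infer_instance

-- ===== CLAIM (what is proved, stated in full; the proofs are below) =====
def Claim_equal_partition_blocks_line_targets_py : Prop := ∀ (blocks : List (List String)) (n_cols : Int), Dom_partition_blocks_line_targets_py blocks n_cols → Spec_partition_blocks_line_targets_py blocks n_cols (partition_blocks_line_targets_py blocks n_cols)

-- ===== LEMMAS AND PROOFS =====

/-- prefix line count: number of lines in the first `p` blocks (as an integer) -/
def pvCumI (blocks : List (List String)) (p : ℕ) : Int :=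
  ((blocks.take p).map (fun b => (b.length : Int))).sum

def pvTotal (blocks : List (List String)) : Int := pvCumI blocks blocks.length

/-- the cumulative-sum list A builds -/
def pvCumList (blocks : List (List String)) : List Int :=
  (List.range (blocks.length + 1)).map (pvCumI blocks)

/-- the k-th line target -/
def pvT (blocks : List (List String)) (n_cols : Int) (k : ℕ) : Int :=
  PySem.Int.floordiv ((k : Int) * pvTotal blocks) n_cols

/-- the split positions A computes -/
def pvS (blocks : List (List String)) (n_cols : Int) : ℕ → Int
  | 0 => 0
  | k+1 => min (max ((PySem.List.bisectLeft (pvCumList blocks) (pvT blocks n_cols (k+1)) : ℕ) : Int)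
                    (pvS blocks n_cols k + 1)) (blocks.length : Int)

/-- the lines of blocks s, …, e-1, concatenated -/
def pvSeg (blocks : List (List String)) (s e : ℕ) : List String :=
  ((blocks.take e).drop s).flatten

/-- A's j-th output column -/
def pvColA (blocks : List (List String)) (n_cols : Int) (j : ℕ) : List String :=
  pvSeg blocks (pvS blocks n_cols j).toNat
    (if j + 1 < n_cols.toNat then (pvS blocks n_cols (j+1)).toNat else blocks.length)

theorem pvCumI_zero (blocks : List (List String)) : pvCumI blocks 0 = 0 := by simp [pvCumI]

theorem pvCumI_succ (blocks : List (List String)) (p : ℕ) (h : p < blocks.length) :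
    pvCumI blocks (p+1) = pvCumI blocks p + (blocks[p].length : Int) := by
  unfold pvCumI
  rw [← List.take_concat_get h, List.concat_eq_append, List.map_append, List.sum_append]
  simp

theorem pvCumI_nonneg (blocks : List (List String)) (p : ℕ) : 0 ≤ pvCumI blocks p := by
  apply List.sum_nonneg
  intro x hx
  simp only [List.mem_map] at hx
  obtain ⟨b, _, rfl⟩ := hx
  positivity

theorem pvCumI_le_succ (blocks : List (List String)) (p : ℕ) :
    pvCumI blocks p ≤ pvCumI blocks (p+1) := by
  by_cases h : p < blocks.length
  · rw [pvCumI_succ blocks p h]; omega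
  · unfold pvCumI
    rw [List.take_of_length_le (by omega), List.take_of_length_le (by omega)]

theorem pvCumI_mono (blocks : List (List String)) {p q : ℕ} (h : p ≤ q) :
    pvCumI blocks p ≤ pvCumI blocks q := by
  induction q, h using Nat.le_induction with
  | base => exact le_rfl
  | succ q hq ih => exact le_trans ih (pvCumI_le_succ blocks q)

theorem length_pvCumList (blocks : List (List String)) :
    (pvCumList blocks).length = blocks.length + 1 := by simp [pvCumList]

theorem getElem_pvCumList (blocks : List (List String)) (j : ℕ) (h : j < blocks.length + 1) :
    (pvCumList blocks)[j]'(by rw [length_pvCumList]; omega) = pvCumI blocks j := by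
  simp [pvCumList]

theorem pairwise_pvCumList (blocks : List (List String)) :
    List.Pairwise (· ≤ ·) (pvCumList blocks) := by
  rw [List.pairwise_iff_getElem]
  intro i j hi hj hij
  rw [length_pvCumList] at hi hj
  rw [getElem_pvCumList blocks i hi, getElem_pvCumList blocks j hj]
  exact pvCumI_mono blocks (by omega)

theorem pvBl_le (blocks : List (List String)) (x : Int) (j : ℕ)
    (hj : j ≤ blocks.length) (hx : x ≤ pvCumI blocks j) :
    PySem.List.bisectLeft (pvCumList blocks) x ≤ j := by
  by_contra hcon
  rw [not_le] at hcon
  have spec := PySem.List.bisectLeft_spec (pvCumList blocks) x (pairwise_pvCumList blocks)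
  have hjl : j < (pvCumList blocks).length := by rw [length_pvCumList]; omega
  have := spec.2.1 j hjl hcon
  rw [getElem_pvCumList blocks j (by omega)] at this
  omega

theorem pvBl_cum_ge (blocks : List (List String)) (x : Int) (j : ℕ)
    (hj : j ≤ blocks.length) (hbl : PySem.List.bisectLeft (pvCumList blocks) x ≤ j) :
    x ≤ pvCumI blocks j := by
  have spec := PySem.List.bisectLeft_spec (pvCumList blocks) x (pairwise_pvCumList blocks)
  have hjl : j < (pvCumList blocks).length := by rw [length_pvCumList]; omega
  have := spec.2.2 j hjl hbl
  rw [getElem_pvCumList blocks j (by omega)] at this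
  exact this

theorem pvT_lt_total (blocks : List (List String)) (n_cols : Int) (hn : 2 ≤ n_cols)
    (htot : 0 < pvTotal blocks) (k : ℕ) (hk : (k : Int) ≤ n_cols - 1) :
    pvT blocks n_cols k < pvTotal blocks := by
  rw [pvT, PySem.Int.floordiv_lt_iff_lt_mul (by omega)]
  nlinarith [htot, hk]

theorem pvBl_T_le_m (blocks : List (List String)) (n_cols : Int) (hn : 2 ≤ n_cols)
    (htot : 0 < pvTotal blocks) (k : ℕ) (hk : (k : Int) ≤ n_cols - 1) :
    PySem.List.bisectLeft (pvCumList blocks) (pvT blocks n_cols k) ≤ blocks.length :=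
  pvBl_le blocks _ blocks.length le_rfl
    (le_of_lt (pvT_lt_total blocks n_cols hn htot k hk))

theorem pvS_nonneg (blocks : List (List String)) (n_cols : Int) (k : ℕ) :
    0 ≤ pvS blocks n_cols k := by
  induction k with
  | zero => simp [pvS]
  | succ k ih =>
    simp only [pvS]
    rw [le_min_iff]
    constructor
    · exact le_trans (by positivity) (le_max_left _ _)
    · positivity

theorem pvS_le_m (blocks : List (List String)) (n_cols : Int) (k : ℕ) :
    pvS blocks n_cols k ≤ (blocks.length : Int) := by
  cases k with
  | zero => simp [pvS]
  | succ k => exact min_le_right _ _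

theorem pvS_le_succ (blocks : List (List String)) (n_cols : Int) (k : ℕ) :
    pvS blocks n_cols k ≤ pvS blocks n_cols (k+1) := by
  simp only [pvS]
  rw [le_min_iff]
  exact ⟨le_trans (by omega) (le_max_right _ _), pvS_le_m blocks n_cols k⟩

theorem pvS_mono (blocks : List (List String)) (n_cols : Int) {k l : ℕ} (h : k ≤ l) :
    pvS blocks n_cols k ≤ pvS blocks n_cols l := by
  induction l, h using Nat.le_induction with
  | base => exact le_rfl
  | succ l hl ih => exact le_trans ih (pvS_le_succ blocks n_cols l)

theorem pvS_succ_ge_bl (blocks : List (List String)) (n_cols : Int) (hn : 2 ≤ n_cols)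
    (htot : 0 < pvTotal blocks) (k : ℕ) (hk : (k : Int) + 1 ≤ n_cols - 1) :
    ((PySem.List.bisectLeft (pvCumList blocks) (pvT blocks n_cols (k+1)) : ℕ) : Int)
      ≤ pvS blocks n_cols (k+1) := by
  have hbl := pvBl_T_le_m blocks n_cols hn htot (k+1) (by push_cast; omega)
  simp only [pvS]
  rw [le_min_iff]
  constructor
  · exact le_max_left _ _
  · exact_mod_cast hbl

theorem pvT_le_cum_S (blocks : List (List String)) (n_cols : Int) (hn : 2 ≤ n_cols)
    (htot : 0 < pvTotal blocks) (k : ℕ) (hk : (k : Int) + 1 ≤ n_cols - 1) :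
    pvT blocks n_cols (k+1) ≤ pvCumI blocks (pvS blocks n_cols (k+1)).toNat := by
  apply pvBl_cum_ge blocks _ _ ?hj ?hbl
  case hj =>
    have h1 := pvS_le_m blocks n_cols (k+1)
    omega
  case hbl =>
    have h1 := pvS_succ_ge_bl blocks n_cols hn htot k hk
    have h2 := pvS_nonneg blocks n_cols (k+1)
    omega

theorem pvS_succ_le (blocks : List (List String)) (n_cols : Int) (k : ℕ) (q : ℕ)
    (hq : q ≤ blocks.length) (h1 : pvS blocks n_cols k < (q : Int))
    (h2 : pvT blocks n_cols (k+1) ≤ pvCumI blocks q) :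
    pvS blocks n_cols (k+1) ≤ (q : Int) := by
  have hbl := pvBl_le blocks _ q hq h2
  simp only [pvS]
  have : max ((PySem.List.bisectLeft (pvCumList blocks) (pvT blocks n_cols (k+1)) : ℕ) : Int)
      (pvS blocks n_cols k + 1) ≤ (q : Int) := by
    rw [max_le_iff]
    constructor
    · exact_mod_cast hbl
    · omega
  exact le_trans (min_le_left _ _) this

-- the cumulative list A's first loop builds
theorem pvCum_fold (blocks : List (List String)) :
    ∀ p : ℕ, p ≤ blocks.length →
    (blocks.take p).foldl
        (fun cum b => cum ++ [PySem.List.pyGetD cum (-1) 0 + (b.length : Int)]) [0]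
      = (List.range (p+1)).map (pvCumI blocks) := by
  intro p hp
  induction p with
  | zero => simp [pvCumI]
  | succ p ih =>
    rw [← List.take_concat_get (by omega : p < blocks.length), List.concat_eq_append,
      List.foldl_append, ih (by omega)]
    simp only [List.foldl_cons, List.foldl_nil]
    rw [List.range_succ (n := p+1), List.map_append]
    congr 1
    have hlast : (List.range (p+1)).map (pvCumI blocks)
        = (List.range p).map (pvCumI blocks) ++ [pvCumI blocks p] := by
      rw [List.range_succ, List.map_append]; simp
    rw [hlast, PySem.List.pyGetD_neg_one_append_singleton]
    simp [pvCumI_succ blocks p (by omega)]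

theorem pvCum_eq (blocks : List (List String)) :
    blocks.foldl (fun cum b => cum ++ [PySem.List.pyGetD cum (-1) 0 + (b.length : Int)]) [0]
      = pvCumList blocks := by
  have := pvCum_fold blocks blocks.length le_rfl
  rw [List.take_length] at this
  rw [this, pvCumList]

theorem pvTotal_eq_last (blocks : List (List String)) :
    PySem.List.pyGetD (pvCumList blocks) (-1) 0 = pvTotal blocks := by
  rw [pvCumList, List.range_succ, List.map_append]
  simp [PySem.List.pyGetD_neg_one_append_singleton, pvTotal]

theorem pvTotal_foldB (blocks : List (List String)) :
    blocks.foldl (fun acc b => acc + (b.length : Int)) 0 = pvTotal blocks := by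
  rw [pvTotal, pvCumI, List.take_length]
  induction blocks using List.reverseRecOn with
  | nil => simp
  | append_singleton xs x ih => simp [ih]

-- A's split-computing loop produces the `pvS` values
theorem pvSplits_fold (blocks : List (List String)) (n_cols : Int) :
    ∀ j : ℕ, (j : Int) + 1 ≤ n_cols →
    (PySem.List.pyRange 1 ((j : Int) + 1) 1).foldl
        (fun splits k =>
          let target_line := PySem.Int.floordiv (k * pvTotal blocks) n_cols
          let bi : Int := (PySem.List.bisectLeft (pvCumList blocks) target_line : ℕ)
          let bi := max bi (PySem.List.pyGetD splits (-1) 0 + 1)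
          let bi := min bi (blocks.length : Int)
          splits ++ [bi]) [0]
      = (List.range (j+1)).map (pvS blocks n_cols) := by
  intro j hj
  induction j with
  | zero =>
    rw [PySem.List.pyRange_one_eq_nil (by omega)]
    simp [pvS]
  | succ j ih =>
    rw [show ((j+1 : ℕ) : Int) + 1 = ((j : Int) + 1) + 1 by push_cast; ring,
      PySem.List.pyRange_one_succ_right (by omega), List.foldl_append, ih (by push_cast at hj ⊢; omega)]
    simp only [List.foldl_cons, List.foldl_nil]
    have hlast : (List.range (j+1)).map (pvS blocks n_cols)
        = (List.range j).map (pvS blocks n_cols) ++ [pvS blocks n_cols j] := by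
      rw [List.range_succ, List.map_append]; simp
    rw [show List.range (j+1+1) = List.range (j+1) ++ [j+1] from List.range_succ,
      List.map_append]
    rw [hlast, PySem.List.pyGetD_neg_one_append_singleton, ← hlast]
    congr 1

theorem pvFixAux_id : ∀ (l : List Int) (prev : Int),
    (∀ (i : ℕ) (h : i + 1 < (prev :: l).length), (prev :: l)[i] ≤ (prev :: l)[i+1]) →
    pvFixAux prev l = l := by
  intro l
  induction l with
  | nil => intro prev _; rfl
  | cons x xs ih =>
    intro prev h
    have h0 : prev ≤ x := h 0 (by simp)
    simp only [pvFixAux]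
    rw [if_neg (by omega)]
    congr 1
    apply ih x
    intro i hi
    exact h (i+1) (by simpa using hi)

theorem pvFixLoop_id (l : List Int)
    (h : ∀ (i : ℕ) (h : i + 1 < l.length), l[i] ≤ l[i+1]) : pvFixLoop l = l := by
  cases l with
  | nil => rfl
  | cons x xs =>
    simp only [pvFixLoop]
    congr 1
    exact pvFixAux_id xs x h

-- the inner column-collecting loop of A's output stage
theorem pvInner (blocks : List (List String)) :
    ∀ (e s : ℕ), e ≤ blocks.length →
    (PySem.List.pyRange (s : Int) (e : Int) 1).foldl
        (fun col bi => col ++ PySem.List.pyGetD blocks bi []) []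
      = pvSeg blocks s e := by
  intro e
  induction e with
  | zero =>
    intro s _
    rw [PySem.List.pyRange_one_eq_nil (by positivity)]
    simp [pvSeg]
  | succ e ih =>
    intro s he
    by_cases hs : s ≤ e
    · rw [show ((e+1 : ℕ) : Int) = (e : Int) + 1 by push_cast; ring,
        PySem.List.pyRange_one_succ_right (by exact_mod_cast hs), List.foldl_append,
        ih s (by omega)]
      simp only [List.foldl_cons, List.foldl_nil]
      rw [show ((e : ℕ) : Int) = ((e : ℕ) : Int) from rfl]
      rw [PySem.List.pyGetD_natCast]
      rw [List.getD_eq_getElem _ _ (by omega)]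
      unfold pvSeg
      rw [← List.take_concat_get (by omega : e < blocks.length), List.concat_eq_append,
        List.drop_append_of_le_length (by simp; omega), List.flatten_append]
      simp
    · rw [PySem.List.pyRange_one_eq_nil (by push_cast; omega)]
      unfold pvSeg
      rw [List.drop_eq_nil_of_le (by simp; omega)]
      simp

-- the streaming invariant for B's single pass
theorem pvStream (blocks : List (List String)) (n_cols : Int) (hn : 2 ≤ n_cols)
    (hm : 1 ≤ blocks.length) (htot : 0 < pvTotal blocks) :
    ∀ p : ℕ, p ≤ blocks.length →
    ∃ t : ℕ, (t : Int) ≤ n_cols - 1 ∧ pvS blocks n_cols t ≤ (p : Int) ∧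
      ((t : Int) < n_cols - 1 →
        ((p : Int) < pvS blocks n_cols (t+1) ∨ pvS blocks n_cols t = (blocks.length : Int))) ∧
      (blocks.take p).foldl
          (fun (st : List (List String) × List String × Int × Int) b =>
            let col := st.2.1 ++ b
            let c := st.2.2.1 + (b.length : Int)
            if st.2.2.2 < n_cols - 1 ∧
                PySem.Int.floordiv ((st.2.2.2 + 1) * pvTotal blocks) n_cols ≤ c then
              (st.1 ++ [col], ([] : List String), c, st.2.2.2 + 1)
            else
              (st.1, col, c, st.2.2.2)) ([], [], 0, 0)
        = ((List.range t).map (fun k =>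
              pvSeg blocks (pvS blocks n_cols k).toNat (pvS blocks n_cols (k+1)).toNat),
            ((blocks.take p).drop (pvS blocks n_cols t).toNat).flatten,
            pvCumI blocks p, (t : Int)) := by
  intro p hp
  induction p with
  | zero =>
    refine ⟨0, by omega, by simp [pvS], ?_, ?_⟩
    · intro _
      left
      have h1 : (1 : Int) ≤ pvS blocks n_cols 1 := by
        simp only [pvS]
        rw [le_min_iff]
        refine ⟨le_trans (by simp) (le_max_right _ _), by exact_mod_cast hm⟩
      push_cast
      omega
    · simp [pvCumI_zero, pvS]
  | succ p ih =>
    obtain ⟨t, ht1, ht2, ht3, ht4⟩ := ih (by omega)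
    have hplen : p < blocks.length := by omega
    have hstep : blocks.take (p+1) = blocks.take p ++ [blocks[p]] := by
      rw [← List.take_concat_get hplen, List.concat_eq_append]
    have hlen_take : (blocks.take p).length = p := by
      rw [List.length_take]; omega
    have hcsucc : pvCumI blocks p + (blocks[p].length : Int) = pvCumI blocks (p+1) :=
      (pvCumI_succ blocks p hplen).symm
    have hSt0 := pvS_nonneg blocks n_cols t
    have hdrop : ∀ s : ℕ, s ≤ p →
        (blocks.take (p+1)).drop s = (blocks.take p).drop s ++ [blocks[p]] := by
      intro s hs
      rw [hstep, List.drop_append_of_le_length (by omega)]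
    have hfold1 : (blocks.take (p+1)).foldl
          (fun (st : List (List String) × List String × Int × Int) b =>
            let col := st.2.1 ++ b
            let c := st.2.2.1 + (b.length : Int)
            if st.2.2.2 < n_cols - 1 ∧
                PySem.Int.floordiv ((st.2.2.2 + 1) * pvTotal blocks) n_cols ≤ c then
              (st.1 ++ [col], ([] : List String), c, st.2.2.2 + 1)
            else
              (st.1, col, c, st.2.2.2)) ([], [], 0, 0)
        = (if ((t : Int)) < n_cols - 1 ∧
              PySem.Int.floordiv (((t : Int) + 1) * pvTotal blocks) n_cols ≤ pvCumI blocks (p+1) then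
            ((List.range t).map (fun k =>
                pvSeg blocks (pvS blocks n_cols k).toNat (pvS blocks n_cols (k+1)).toNat)
              ++ [((blocks.take p).drop (pvS blocks n_cols t).toNat).flatten ++ blocks[p]],
              ([] : List String), pvCumI blocks (p+1), (t : Int) + 1)
          else
            ((List.range t).map (fun k =>
                pvSeg blocks (pvS blocks n_cols k).toNat (pvS blocks n_cols (k+1)).toNat),
              ((blocks.take p).drop (pvS blocks n_cols t).toNat).flatten ++ blocks[p],
              pvCumI blocks (p+1), (t : Int))) := by
      rw [hstep, List.foldl_append, ht4]
      simp only [List.foldl_cons, List.foldl_nil, hcsucc]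
    have hTcast : PySem.Int.floordiv (((t : Int) + 1) * pvTotal blocks) n_cols
        = pvT blocks n_cols (t+1) := by
      rw [pvT]; push_cast; ring_nf
    by_cases hC : ((t : Int)) < n_cols - 1 ∧
        pvT blocks n_cols (t+1) ≤ pvCumI blocks (p+1)
    · -- the column closes at p+1, and p+1 is exactly the next split
      have hnotm : pvS blocks n_cols t ≠ (blocks.length : Int) := by
        have : (p : Int) + 1 ≤ (blocks.length : Int) := by exact_mod_cast hp
        omega
      have hlt : (p : Int) < pvS blocks n_cols (t+1) := (ht3 hC.1).resolve_right hnotm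
      have hle : pvS blocks n_cols (t+1) ≤ ((p+1 : ℕ) : Int) :=
        pvS_succ_le blocks n_cols t (p+1) hp (by push_cast; omega) hC.2
      have hpe : pvS blocks n_cols (t+1) = (p : Int) + 1 := by push_cast at hle; omega
      refine ⟨t+1, by push_cast; omega, by push_cast; omega, ?_, ?_⟩
      · intro h
        by_cases hpm : p + 1 = blocks.length
        · right
          rw [hpe]
          exact_mod_cast congrArg (fun q : ℕ => (q : Int)) hpm
        · left
          have hm2 : (p : Int) + 2 ≤ (blocks.length : Int) := by
            have h3 : p + 2 ≤ blocks.length := by omega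
            exact_mod_cast h3
          have h2 : ((p : Int) + 1) + 1 ≤ pvS blocks n_cols (t+1+1) := by
            have hunf : pvS blocks n_cols (t+1+1)
                = min (max ((PySem.List.bisectLeft (pvCumList blocks)
                      (pvT blocks n_cols (t+1+1)) : ℕ) : Int)
                    (pvS blocks n_cols (t+1) + 1)) (blocks.length : Int) := rfl
            have hub := le_max_right ((PySem.List.bisectLeft (pvCumList blocks)
                      (pvT blocks n_cols (t+1+1)) : ℕ) : Int) (pvS blocks n_cols (t+1) + 1)
            rw [hunf, le_min_iff]
            exact ⟨by omega, by omega⟩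
          push_cast
          omega
      · rw [hfold1, if_pos ⟨hC.1, by rw [hTcast]; exact hC.2⟩]
        have he : (pvS blocks n_cols (t+1)).toNat = p + 1 := by omega
        have hout : (List.range t).map (fun k =>
              pvSeg blocks (pvS blocks n_cols k).toNat (pvS blocks n_cols (k+1)).toNat)
              ++ [((blocks.take p).drop (pvS blocks n_cols t).toNat).flatten ++ blocks[p]]
            = (List.range (t+1)).map (fun k =>
              pvSeg blocks (pvS blocks n_cols k).toNat (pvS blocks n_cols (k+1)).toNat) := by
          rw [List.range_succ, List.map_append]
          congr 1
          simp only [List.map_cons, List.map_nil]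
          congr 1
          rw [pvSeg, he, hdrop (pvS blocks n_cols t).toNat (by omega), List.flatten_append]
          simp
        have hcol : ((blocks.take (p+1)).drop (pvS blocks n_cols (t+1)).toNat).flatten
            = ([] : List String) := by
          rw [he, List.drop_eq_nil_of_le (by rw [List.length_take]; omega)]
          simp
        rw [hout, hcol, show ((t : Int) + 1) = ((t+1 : ℕ) : Int) by push_cast; ring]
    · -- no close: the state keeps the same open column
      refine ⟨t, ht1, by push_cast; omega, ?_, ?_⟩
      · intro h
        rcases ht3 h with hlt | hm'
        · left
          have hne : pvS blocks n_cols (t+1) ≠ (p : Int) + 1 := by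
            intro heq
            apply hC
            refine ⟨h, ?_⟩
            have hcs := pvT_le_cum_S blocks n_cols hn htot t (by omega)
            rw [heq] at hcs
            have : ((p : Int) + 1).toNat = p + 1 := by omega
            rw [this] at hcs
            exact hcs
          push_cast
          omega
        · right; exact hm'
      · rw [hfold1, if_neg (by rw [hTcast]; exact hC)]
        have hcol : ((blocks.take (p+1)).drop (pvS blocks n_cols t).toNat).flatten
            = ((blocks.take p).drop (pvS blocks n_cols t).toNat).flatten ++ blocks[p] := by
          rw [hdrop (pvS blocks n_cols t).toNat (by omega), List.flatten_append]
          simp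
        rw [hcol]

theorem pvColA_eq_nil (blocks : List (List String)) (n_cols : Int) (k : ℕ)
    (hk : pvS blocks n_cols k = (blocks.length : Int)) :
    pvColA blocks n_cols k = [] := by
  rw [pvColA, pvSeg, hk, Int.toNat_natCast,
    List.drop_eq_nil_of_le (by rw [List.length_take]; omega)]
  rfl

theorem pvMain (blocks : List (List String)) (n_cols : Int) :
    partition_blocks_line_targets_py blocks n_cols
      = partition_blocks_line_targets_py_alt blocks n_cols := by
  simp only [partition_blocks_line_targets_py, partition_blocks_line_targets_py_alt,
    pvCum_eq, pvTotal_eq_last, pvTotal_foldB]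
  split_ifs with h1 h2 h3
  · rfl
  · rfl
  · rfl
  -- main branch
  have hn : 2 ≤ n_cols := by omega
  have hmlen : 1 ≤ blocks.length := by
    rcases Nat.eq_zero_or_pos blocks.length with h | h
    · exact absurd (by rw [h]; rfl) h2
    · omega
  have htot : 0 < pvTotal blocks := by
    have := pvCumI_nonneg blocks blocks.length
    rw [pvTotal] at *
    omega
  have hncast : ((n_cols.toNat : ℕ) : Int) = n_cols := by omega
  -- A's splits list
  have hsp := pvSplits_fold blocks n_cols (n_cols.toNat - 1) (by omega)
  rw [show ((n_cols.toNat - 1 : ℕ) : Int) + 1 = n_cols by omega,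
    show n_cols.toNat - 1 + 1 = n_cols.toNat by omega] at hsp
  rw [hsp]
  -- the monotone-fix pass is the identity
  have hfix : pvFixLoop ((List.range n_cols.toNat).map (pvS blocks n_cols)
        ++ [(blocks.length : Int)])
      = (List.range n_cols.toNat).map (pvS blocks n_cols) ++ [(blocks.length : Int)] := by
    apply pvFixLoop_id
    intro i hi
    have hlen : ((List.range n_cols.toNat).map (pvS blocks n_cols)
        ++ [(blocks.length : Int)]).length = n_cols.toNat + 1 := by simp
    rw [hlen] at hi
    by_cases hin : i + 1 < n_cols.toNat
    · rw [List.getElem_append_left (by simp; omega), List.getElem_append_left (by simp; omega)]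
      simp only [List.getElem_map, List.getElem_range]
      exact pvS_le_succ blocks n_cols i
    · have hieq : i + 1 = n_cols.toNat := by omega
      rw [List.getElem_append_left (by simp; omega), List.getElem_append_right (by simp; omega)]
      simp only [List.getElem_map, List.getElem_range]
      have := pvS_le_m blocks n_cols i
      simpa using this
  rw [hfix]
  -- A's output loop is a map over the column index
  rw [PySem.List.foldl_append_singleton_eq_map]
  have hRange : PySem.List.pyRange 0 n_cols 1
      = (List.range n_cols.toNat).map (fun k : ℕ => (k : Int)) := by
    rw [show n_cols = ((n_cols.toNat : ℕ) : Int) by omega, Int.toNat_natCast]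
    exact PySem.List.pyRange_zero_nat _
  rw [hRange, List.map_map, List.nil_append]
  -- indexing into the splits list
  have hgetj : ∀ i : ℕ, i < n_cols.toNat + 1 →
      PySem.List.pyGetD ((List.range n_cols.toNat).map (pvS blocks n_cols)
          ++ [(blocks.length : Int)]) (i : Int) 0
        = (if i < n_cols.toNat then pvS blocks n_cols i else (blocks.length : Int)) := by
    intro i hi
    rw [PySem.List.pyGetD_natCast]
    by_cases hc : i < n_cols.toNat
    · rw [if_pos hc, List.getD_eq_getElem _ _ (by simp; omega),
        List.getElem_append_left (by simp; omega)]
      simp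
    · rw [if_neg hc]
      have hieq : i = n_cols.toNat := by omega
      subst hieq
      rw [List.getD_eq_getElem _ _ (by simp), List.getElem_append_right (by simp)]
      simp
  -- A's columns are pvColA
  have hAcols : (List.range n_cols.toNat).map
        ((fun j : Int =>
          (PySem.List.pyRange
              (PySem.List.pyGetD ((List.range n_cols.toNat).map (pvS blocks n_cols)
                ++ [(blocks.length : Int)]) j 0)
              (PySem.List.pyGetD ((List.range n_cols.toNat).map (pvS blocks n_cols)
                ++ [(blocks.length : Int)]) (j + 1) 0) 1).foldl
            (fun col bi => col ++ PySem.List.pyGetD blocks bi []) [])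
          ∘ (fun k : ℕ => (k : Int)))
      = (List.range n_cols.toNat).map (pvColA blocks n_cols) := by
    apply List.map_congr_left
    intro j hj
    rw [List.mem_range] at hj
    simp only [Function.comp_apply]
    rw [hgetj j (by omega),
      show ((j : ℕ) : Int) + 1 = ((j+1 : ℕ) : Int) by push_cast; ring,
      hgetj (j+1) (by omega), if_pos hj]
    by_cases hj1 : j + 1 < n_cols.toNat
    · rw [if_pos hj1,
        show pvS blocks n_cols j = (((pvS blocks n_cols j).toNat) : Int) by
          have := pvS_nonneg blocks n_cols j; omega,
        show pvS blocks n_cols (j+1) = (((pvS blocks n_cols (j+1)).toNat) : Int) by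
          have := pvS_nonneg blocks n_cols (j+1); omega,
        pvInner blocks _ _ (by have := pvS_le_m blocks n_cols (j+1); omega),
        pvColA, if_pos hj1]
    · rw [if_neg hj1,
        show pvS blocks n_cols j = (((pvS blocks n_cols j).toNat) : Int) by
          have := pvS_nonneg blocks n_cols j; omega,
        pvInner blocks blocks.length _ le_rfl,
        pvColA, if_neg hj1]
  rw [hAcols]
  -- B's single pass
  obtain ⟨t, htn, hts, htp, htfold⟩ :=
    pvStream blocks n_cols hn hmlen htot blocks.length le_rfl
  rw [List.take_length] at htfold
  rw [htfold]
  dsimp only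
  have hstm : t + 1 < n_cols.toNat → pvS blocks n_cols t = (blocks.length : Int) := by
    intro h
    rcases htp (by omega) with h' | h'
    · have := pvS_le_m blocks n_cols (t+1); omega
    · exact h'
  have hrep : (PySem.List.pyRange 0
        (n_cols - ((((List.range t).map (fun k =>
          pvSeg blocks (pvS blocks n_cols k).toNat (pvS blocks n_cols (k+1)).toNat)).length : Int) + 1)) 1).map
        (fun _ => ([] : List String))
      = List.replicate (n_cols.toNat - (t+1)) ([] : List String) := by
    rw [List.map_const', PySem.List.length_pyRange_one]
    congr 1
    simp only [List.length_map, List.length_range]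
    omega
  rw [hrep]
  have htle : t + 1 ≤ n_cols.toNat := by omega
  apply List.ext_getElem
  · simp only [List.length_map, List.length_range, List.length_append,
      List.length_replicate, List.length_cons, List.length_nil]
    omega
  · intro i hi1 hi2
    simp only [List.length_map, List.length_range] at hi1
    simp only [List.getElem_map, List.getElem_range]
    rcases Nat.lt_trichotomy i t with hit | hit | hit
    · rw [List.getElem_append_left (by simp; omega),
        List.getElem_append_left (by simp; omega)]
      simp only [List.getElem_map, List.getElem_range]
      rw [pvColA, if_pos (by omega)]
    · subst hit
      rw [List.getElem_append_left (by simp),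
        List.getElem_append_right (by simp)]
      simp only [List.length_map, List.length_range, Nat.sub_self, List.getElem_cons_zero]
      by_cases ht1 : i + 1 < n_cols.toNat
      · simp [pvColA_eq_nil blocks n_cols i (hstm ht1), hstm ht1]
      · rw [pvColA, if_neg (by omega), pvSeg, List.take_length]
    · rw [List.getElem_append_right (by simp; omega)]
      rw [List.getElem_replicate]
      have h1 : i + 1 ≤ n_cols.toNat := by omega
      have h2 : pvS blocks n_cols i = (blocks.length : Int) := by
        have ha := pvS_mono blocks n_cols (le_of_lt hit)
        have hb := pvS_le_m blocks n_cols i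
        have hc := hstm (by omega)
        omega
      exact pvColA_eq_nil blocks n_cols i h2

-- ===== VERDICT (by name: the statement is the Claim_ definition above) =====
theorem partition_blocks_line_targets_py_spec : Claim_equal_partition_blocks_line_targets_py := by
  intro blocks n_cols _
  unfold Spec_partition_blocks_line_targets_py
  exact pvMain blocks n_cols
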